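-- pv_equiv track=rewrite | github.com/yuweiiihuang/mahjong16 | main.py | _colorize_label
-- ===== SOURCE A (Python) =====
-- ANSI_RESET = "\033[0m"
--
-- ANSI_RED   = "\033[31m"  # 萬
--
-- ANSI_BLUE  = "\033[34m"  # 筒
--
-- ANSI_GREEN = "\033[32m"  # 條
--
-- ANSI_MAG   = "\033[35m"  # 字（風/箭）
--
-- def _colorize_label(s: str) -> str:
--     """上色單一牌面字串（允許尾端 * 標記）。"""
--     if not s:
--         return s
--     if s.endswith("*"):
--         core = s[:-1]
--         return f"{_colorize_label(core)}*"
--     ch0 = s[0]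
--     if ch0.isdigit() and len(s) >= 2:
--         suit = s[-1]
--         if suit == "W":
--             return f"{ANSI_RED}{s}{ANSI_RESET}"
--         if suit == "D":
--             return f"{ANSI_BLUE}{s}{ANSI_RESET}"
--         if suit == "B":
--             return f"{ANSI_GREEN}{s}{ANSI_RESET}"
--     if ch0 in "ESWNCFP" and len(s) == 1:
--         return f"{ANSI_MAG}{s}{ANSI_RESET}"
--     return s
-- ===== SOURCE B (Python) =====
-- ANSI_RESET = "\033[0m"
-- ANSI_RED   = "\033[31m"
-- ANSI_BLUE  = "\033[34m"
-- ANSI_GREEN = "\033[32m"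
-- ANSI_MAG   = "\033[35m"
--
-- _SUIT_COLOR = {"W": ANSI_RED, "D": ANSI_BLUE, "B": ANSI_GREEN}
--
-- def _colored_core(core: str) -> str:
--     if core and core[0].isdigit() and len(core) >= 2:
--         color = _SUIT_COLOR.get(core[-1])
--         if color:
--             return color + core + ANSI_RESET
--     if len(core) == 1 and core[0] in "ESWNCFP":
--         return ANSI_MAG + core + ANSI_RESET
--     return core
--
-- def _colorize_label(s: str) -> str:
--     n = len(s)
--     while n > 0 and s[n - 1] == "*":
--         n -= 1
--     return _colored_core(s[:n]) + s[n:]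
-- ===== Notes on version B (the rewrite author's own statement) =====
-- stated objective: simpler
-- what changed: Replaces the recursion that peels one trailing asterisk per call with a single backward scan that strips all trailing asterisks at once, then applies the coloring decision exactly once to the core and re-appends the asterisks.
import Mathlib
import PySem

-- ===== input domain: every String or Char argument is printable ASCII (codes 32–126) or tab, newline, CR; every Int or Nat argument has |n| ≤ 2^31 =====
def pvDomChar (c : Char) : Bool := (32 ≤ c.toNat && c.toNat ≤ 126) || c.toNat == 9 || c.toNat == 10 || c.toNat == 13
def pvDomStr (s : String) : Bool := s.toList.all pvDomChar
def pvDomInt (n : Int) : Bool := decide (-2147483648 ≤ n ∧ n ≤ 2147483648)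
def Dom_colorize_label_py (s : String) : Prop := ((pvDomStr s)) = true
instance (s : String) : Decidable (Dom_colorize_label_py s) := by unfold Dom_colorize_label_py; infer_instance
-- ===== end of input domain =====

-- B strips all trailing asterisks in one backward scan and runs the coloring decision once on the
-- core, instead of A's one-star-per-call recursion; objective: simpler.

-- module-level ANSI constants shared by both Pythons
def pvRESET : List Char := "\x1b[0m".toList
def pvRED   : List Char := "\x1b[31m".toList
def pvBLUE  : List Char := "\x1b[34m".toList
def pvGREEN : List Char := "\x1b[32m".toList
def pvMAG   : List Char := "\x1b[35m".toList

-- ===== PORT A =====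
-- literal transliteration of A's recursion over the characters of s
-- (Char.isDigit is exact for Python str.isdigit on the printable-ASCII domain)
def pvColorA (l : List Char) : List Char :=
  if l = [] then l
  else if l.getLast? = some '*' then
    pvColorA l.dropLast ++ ['*']
  else
    let ch0 := l.headD ' '
    if ch0.isDigit = true ∧ 2 ≤ l.length then
      if l.getLast? = some 'W' then pvRED ++ l ++ pvRESET
      else if l.getLast? = some 'D' then pvBLUE ++ l ++ pvRESET
      else if l.getLast? = some 'B' then pvGREEN ++ l ++ pvRESET
      else if ch0 ∈ "ESWNCFP".toList ∧ l.length = 1 then pvMAG ++ l ++ pvRESET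
      else l
    else if ch0 ∈ "ESWNCFP".toList ∧ l.length = 1 then pvMAG ++ l ++ pvRESET
    else l
termination_by l.length
decreasing_by
  have hne : l ≠ [] := by assumption
  have := List.length_pos_of_ne_nil hne
  simp [List.length_dropLast]; omega

def colorize_label_py (s : String) : String := String.ofList (pvColorA s.toList)

-- ===== PORT B =====
def pvSuitColor : List (Char × List Char) := [('W', pvRED), ('D', pvBLUE), ('B', pvGREEN)]

-- port of Source B's _colored_core: the coloring decision, applied once to the star-free core
def pvColoredCore (core : List Char) : List Char :=
  if core ≠ [] ∧ (core.headD ' ').isDigit = true ∧ 2 ≤ core.length then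
    match pvSuitColor.lookup (core.getLastD ' ') with
    | some col => col ++ core ++ pvRESET
    | none =>
      if core.length = 1 ∧ core.headD ' ' ∈ "ESWNCFP".toList then pvMAG ++ core ++ pvRESET
      else core
  else if core.length = 1 ∧ core.headD ' ' ∈ "ESWNCFP".toList then pvMAG ++ core ++ pvRESET
  else core

-- Source B's backward while loop = length of the maximal run of trailing '*' characters
def colorize_label_py_alt (s : String) : String :=
  let l := s.toList
  let k := (l.reverse.takeWhile (fun c => c = '*')).length
  String.ofList (pvColoredCore (l.take (l.length - k)) ++ List.replicate k '*')

-- ===== PRECONDITION & SPEC =====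
def Spec_colorize_label_py (s : String) (out : String) : Prop := out = colorize_label_py_alt s
instance (s : String) (out : String) : Decidable (Spec_colorize_label_py s out) := by unfold Spec_colorize_label_py; infer_instance

-- ===== CLAIM (what is proved, stated in full; the proofs are below) =====
def Claim_equal_colorize_label_py : Prop := ∀ (s : String), Dom_colorize_label_py s → Spec_colorize_label_py s (colorize_label_py s)

-- ===== LEMMAS AND PROOFS =====

-- number of trailing asterisks, and B's result on a raw char list
def pvK (l : List Char) : Nat := (l.reverse.takeWhile (fun c => c = '*')).length

def pvAltList (l : List Char) : List Char :=
  pvColoredCore (l.take (l.length - pvK l)) ++ List.replicate (pvK l) '*'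

lemma pvK_le (l : List Char) : pvK l ≤ l.length := by
  have h := (List.takeWhile_prefix (p := fun c : Char => decide (c = '*')) (l := l.reverse)).sublist.length_le
  simpa [pvK] using h

lemma pvK_concat_star (m : List Char) : pvK (m ++ ['*']) = pvK m + 1 := by
  simp [pvK, List.reverse_append]

lemma pvK_concat_nostar (m : List Char) (c : Char) (hc : c ≠ '*') : pvK (m ++ [c]) = 0 := by
  simp [pvK, List.reverse_append, hc]

-- A's decision branch equals B's decision on a star-free nonempty core written as m ++ [c]
lemma decide_eq (m : List Char) (c : Char) (hc : c ≠ '*') :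
    pvColorA (m ++ [c]) = pvColoredCore (m ++ [c]) := by
  have hne : m ++ [c] ≠ [] := by simp
  have hlast : (m ++ [c]).getLast? = some c := by simp
  have hlastD : (m ++ [c]).getLastD ' ' = c := by
    rw [List.getLastD_eq_getLast?, hlast]
    rfl
  have hns : ¬ ((m ++ [c]).getLast? = some '*') := by simp [hlast, hc]
  rw [pvColorA.eq_def]
  rw [if_neg hne, if_neg hns]
  unfold pvColoredCore
  rw [hlastD, hlast]
  by_cases hd : ((m ++ [c]).headD ' ').isDigit = true ∧ 2 ≤ (m ++ [c]).length
  · have hd' : m ++ [c] ≠ [] ∧ ((m ++ [c]).headD ' ').isDigit = true ∧ 2 ≤ (m ++ [c]).length :=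
      ⟨hne, hd⟩
    rw [if_pos hd, if_pos hd']
    by_cases hW : c = 'W'
    · subst hW
      rw [if_pos rfl]
      simp [pvSuitColor, List.lookup]
    · rw [if_neg (show ¬ (some c = some 'W') by simp [hW])]
      by_cases hD : c = 'D'
      · subst hD
        rw [if_pos rfl]
        simp [pvSuitColor, List.lookup]
      · rw [if_neg (show ¬ (some c = some 'D') by simp [hD])]
        by_cases hB : c = 'B'
        · subst hB
          rw [if_pos rfl]
          simp [pvSuitColor, List.lookup]
        · rw [if_neg (show ¬ (some c = some 'B') by simp [hB])]
          have w : (c == 'W') = false := beq_eq_false_iff_ne.mpr hW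
          have d : (c == 'D') = false := beq_eq_false_iff_ne.mpr hD
          have b : (c == 'B') = false := beq_eq_false_iff_ne.mpr hB
          have hlk : pvSuitColor.lookup c = none := by
            simp [pvSuitColor, List.lookup, w, d, b]
          rw [hlk]
          exact if_congr and_comm rfl rfl
  · rw [if_neg hd]
    have hd' : ¬ (m ++ [c] ≠ [] ∧ ((m ++ [c]).headD ' ').isDigit = true ∧ 2 ≤ (m ++ [c]).length) :=
      fun h => hd h.2
    rw [if_neg hd']
    exact if_congr and_comm rfl rfl

lemma altList_nostar (m : List Char) (c : Char) (hc : c ≠ '*') :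
    pvAltList (m ++ [c]) = pvColoredCore (m ++ [c]) := by
  unfold pvAltList
  rw [pvK_concat_nostar m c hc]
  have hlen : (m ++ [c]).length - 0 = (m ++ [c]).length := rfl
  rw [hlen, List.take_length]
  simp

lemma altList_star (m : List Char) : pvAltList (m ++ ['*']) = pvAltList m ++ ['*'] := by
  have hk := pvK_concat_star m
  have hkle := pvK_le m
  unfold pvAltList
  rw [hk]
  have h1 : (m ++ ['*']).length - (pvK m + 1) = m.length - pvK m := by
    rw [List.length_append]
    simp
  rw [h1]
  have h2 : (m ++ ['*']).take (m.length - pvK m) = m.take (m.length - pvK m) := by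
    rw [List.take_append_of_le_length (by omega)]
  rw [h2, List.replicate_succ']
  simp [List.append_assoc]

-- main invariant, by induction on the reversed list
lemma main_rev (r : List Char) : pvColorA r.reverse = pvAltList r.reverse := by
  induction r with
  | nil => simp [pvColorA, pvAltList, pvK, pvColoredCore]
  | cons c r' ih =>
    rw [show (c :: r').reverse = r'.reverse ++ [c] by simp]
    by_cases hc : c = '*'
    · subst hc
      have hA : pvColorA (r'.reverse ++ ['*']) = pvColorA r'.reverse ++ ['*'] := by
        rw [pvColorA.eq_def]
        rw [if_neg (by simp : ¬ (r'.reverse ++ ['*'] = []))]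
        rw [if_pos (by simp : (r'.reverse ++ ['*']).getLast? = some '*')]
        rw [List.dropLast_concat]
      rw [hA, ih, altList_star]
    · rw [decide_eq r'.reverse c hc, altList_nostar r'.reverse c hc]

lemma main_all (l : List Char) : pvColorA l = pvAltList l := by
  have h := main_rev l.reverse
  simpa using h

-- ===== VERDICT (by name: the statement is the Claim_ definition above) =====
theorem colorize_label_py_spec : Claim_equal_colorize_label_py := by
  intro s _
  show colorize_label_py s = colorize_label_py_alt s
  unfold colorize_label_py colorize_label_py_alt
  rw [main_all]
  rfl
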